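-- pv_equiv track=rewrite | github.com/BrokenEagle/Prebooru | app/logical/records/image_hash_rec.py | filter_score_results
-- ===== SOURCE A (Python) =====
-- def filter_score_results(score_results):
--     """Posts can have more than one image hash, so only return the one with the highest score"""
--     seen = set()
--     final_results = []
--     score_results = sorted(score_results, key=lambda x: x['score'], reverse=True)
--     for result in score_results:
--         if result['post_id'] in seen:
--             continue
--         final_results.append(result)
--         seen.add(result['post_id'])
--     return final_results
-- ===== SOURCE B (Python) =====
-- def filter_score_results(score_results):
--     """Posts can have more than one image hash, so only return the one with the highest score"""
--     final_results = []
--     remaining = score_results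
--     while remaining:
--         best = max(remaining, key=lambda r: r['score'])
--         final_results.append(best)
--         pid = best['post_id']
--         remaining = [r for r in remaining if r['post_id'] != pid]
--     return final_results
-- ===== Notes on version B (the rewrite author's own statement) =====
-- stated objective: alternative
-- what changed: Replaces A's stable descending sort followed by a set-based first-seen dedup with repeated selection: take the first maximum-score result, drop every result sharing its post_id, repeat until nothing is left.
import Mathlib
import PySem

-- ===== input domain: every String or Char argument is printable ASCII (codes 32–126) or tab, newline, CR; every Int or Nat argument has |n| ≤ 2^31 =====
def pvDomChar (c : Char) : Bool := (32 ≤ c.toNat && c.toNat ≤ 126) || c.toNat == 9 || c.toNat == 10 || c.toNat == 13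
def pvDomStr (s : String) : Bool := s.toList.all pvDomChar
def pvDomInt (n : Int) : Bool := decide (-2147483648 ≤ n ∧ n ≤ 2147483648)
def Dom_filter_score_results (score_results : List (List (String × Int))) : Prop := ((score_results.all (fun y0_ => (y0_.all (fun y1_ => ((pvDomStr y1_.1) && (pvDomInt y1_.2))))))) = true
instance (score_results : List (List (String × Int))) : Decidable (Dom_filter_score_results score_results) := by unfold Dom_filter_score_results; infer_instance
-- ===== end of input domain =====

-- B replaces "stable sort desc + set-based first-seen dedup" by repeated selection: take the
-- first maximum-score result, drop its whole post_id group, repeat (objective: alternative).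

-- r[key]: first-match dict lookup; Pre_ guarantees the key is present (Python raises KeyError otherwise)
def pvGetI (r : List (String × Int)) (key : String) : Int := (List.lookup key r).getD 0

def pvScore (r : List (String × Int)) : Int := pvGetI r "score"

def pvPid (r : List (String × Int)) : Int := pvGetI r "post_id"

-- ===== PORT A =====
def filter_score_results (score_results : List (List (String × Int))) : List (List (String × Int)) :=
  let sorted_results := PySem.List.sorted score_results (fun x => pvScore x) true
  (sorted_results.foldl
    (fun (st : List (List (String × Int)) × PySem.Set Int) result =>
      if st.2.contains (pvPid result) then st
      else (st.1 ++ [result], st.2.add (pvPid result)))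
    ([], PySem.Set.empty)).1

-- ===== PORT B =====
-- the while loop of Source B: max(remaining, key=score) is PySem.List.max? (first maximal element)
def pvAltLoop (final_results : List (List (String × Int))) (remaining : List (List (String × Int))) :
    List (List (String × Int)) :=
  match h : PySem.List.max? remaining (fun r => pvScore r) with
  | none => final_results
  | some best =>
      pvAltLoop (final_results ++ [best]) (remaining.filter (fun r => pvPid r != pvPid best))
termination_by remaining.length
decreasing_by
  have hmem : best ∈ remaining := PySem.List.max?_mem h
  have hlt := (List.length_filter_lt_length_iff_exists
    (p := fun r => pvPid r != pvPid best) (l := remaining)).mpr ⟨best, hmem, by simp⟩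
  simpa using hlt

def filter_score_results_alt (score_results : List (List (String × Int))) : List (List (String × Int)) :=
  pvAltLoop [] score_results

-- ===== PRECONDITION & SPEC =====
-- Pre_: every result dict has the keys 'score' and 'post_id' (A raises KeyError otherwise)
def Pre_filter_score_results (score_results : List (List (String × Int))) : Prop :=
  ∀ r ∈ score_results, (List.lookup "score" r).isSome = true ∧ (List.lookup "post_id" r).isSome = true
instance (score_results : List (List (String × Int))) : Decidable (Pre_filter_score_results score_results) := by unfold Pre_filter_score_results; infer_instance

def pvWitness_filter_score_results : (List (List (String × Int))) :=
  [[("score", 5), ("post_id", 1)], [("score", 7), ("post_id", 1)], [("score", 7), ("post_id", 2)]]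

def Spec_filter_score_results (score_results : List (List (String × Int))) (out : List (List (String × Int))) : Prop := out = filter_score_results_alt score_results
instance (score_results : List (List (String × Int))) (out : List (List (String × Int))) : Decidable (Spec_filter_score_results score_results out) := by unfold Spec_filter_score_results; infer_instance

-- ===== CLAIM (what is proved, stated in full; the proofs are below) =====
def Claim_equal_filter_score_results : Prop := ∀ (score_results : List (List (String × Int))), Dom_filter_score_results score_results → Pre_filter_score_results score_results → Spec_filter_score_results score_results (filter_score_results score_results)

-- ===== LEMMAS AND PROOFS =====

-- abbreviations for the proofs
def pvBef (a b : List (String × Int)) : Bool := decide (pvScore b < pvScore a)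

def pvIns (x : List (String × Int)) (l : List (List (String × Int))) : List (List (String × Int)) :=
  PySem.List.insertBy pvBef x l

def pvSsort (xs : List (List (String × Int))) : List (List (String × Int)) :=
  xs.foldl (fun acc x => pvIns x acc) []

def pvDedup (seen : PySem.Set Int) : List (List (String × Int)) → List (List (String × Int))
  | [] => []
  | r :: rest =>
      if seen.contains (pvPid r) then pvDedup seen rest
      else r :: pvDedup (seen.add (pvPid r)) rest

lemma pvSsort_eq (xs : List (List (String × Int))) :
    PySem.List.sorted xs (fun x => pvScore x) true = pvSsort xs := by
  rw [PySem.List.sorted_rev_eq_foldl_insertBy]; rfl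

lemma pvFoldA (l : List (List (String × Int))) (acc : List (List (String × Int))) (seen : PySem.Set Int) :
    (l.foldl
      (fun (st : List (List (String × Int)) × PySem.Set Int) result =>
        if st.2.contains (pvPid result) then st
        else (st.1 ++ [result], st.2.add (pvPid result)))
      (acc, seen)).1 = acc ++ pvDedup seen l := by
  induction l generalizing acc seen with
  | nil => simp [pvDedup]
  | cons r rest ih =>
      by_cases hc : seen.contains (pvPid r) = true
      · simp only [List.foldl_cons, pvDedup, if_pos hc]
        exact ih acc seen
      · simp only [List.foldl_cons, pvDedup, if_neg hc]
        rw [ih]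
        simp

lemma pvContains_add (s : PySem.Set Int) (y x : Int) :
    (s.add y).contains x = (s.contains x || x == y) := by
  unfold PySem.Set.add
  by_cases hc : s.contains y = true
  · rw [if_pos hc]
    by_cases hxy : x = y
    · subst hxy; rw [hc]; simp
    · simp [hxy]
  · rw [if_neg hc]
    by_cases hxy : x = y
    · subst hxy; simp [PySem.Set.contains, List.contains_append]
    · simp [PySem.Set.contains, List.contains_append, hxy]

lemma pvDedup_congr (l : List (List (String × Int))) (s t : PySem.Set Int)
    (h : ∀ x, s.contains x = t.contains x) : pvDedup s l = pvDedup t l := by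
  induction l generalizing s t with
  | nil => rfl
  | cons r rest ih =>
      by_cases hc : t.contains (pvPid r) = true
      · have hcs : s.contains (pvPid r) = true := by rw [h]; exact hc
        simp only [pvDedup, if_pos hc, if_pos hcs]
        exact ih s t h
      · have hcs : ¬ s.contains (pvPid r) = true := by rw [h]; exact hc
        simp only [pvDedup, if_neg hc, if_neg hcs]
        exact congrArg (r :: ·) (ih _ _ (fun x => by
          rw [pvContains_add, pvContains_add, h]))

lemma pvDedup_add (l : List (List (String × Int))) (seen : PySem.Set Int) (p : Int) :
    pvDedup (seen.add p) l = pvDedup seen (l.filter (fun r => pvPid r != p)) := by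
  induction l generalizing seen with
  | nil => rfl
  | cons r rest ih =>
      by_cases hp : (pvPid r == p) = true
      · have hct : (seen.add p).contains (pvPid r) = true := by
          rw [pvContains_add]; simp [hp]
        have hfil : ¬ (pvPid r != p) = true := by simp [bne, hp]
        simp only [pvDedup, if_pos hct, List.filter_cons, if_neg hfil]
        exact ih seen
      · have hfil : (pvPid r != p) = true := by simp [bne, hp]
        by_cases hc : seen.contains (pvPid r) = true
        · have hct : (seen.add p).contains (pvPid r) = true := by
            rw [pvContains_add, hc]; rfl
          simp only [pvDedup, if_pos hct, List.filter_cons, if_pos hfil, if_pos hc]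
          exact ih seen
        · have hct : ¬ (seen.add p).contains (pvPid r) = true := by
            rw [pvContains_add]
            simp only [Bool.or_eq_true]
            rintro (h1 | h2)
            · exact hc h1
            · exact hp h2
          simp only [pvDedup, List.filter_cons, if_pos hfil, if_neg hct, if_neg hc]
          refine congrArg (r :: ·) ?_
          have hcomm : ∀ x, ((seen.add p).add (pvPid r)).contains x
              = ((seen.add (pvPid r)).add p).contains x := by
            intro x
            rw [pvContains_add, pvContains_add, pvContains_add, pvContains_add]
            cases s1 : PySem.Set.contains seen x <;> cases s2 : (x == pvPid r) <;>
              cases s3 : (x == p) <;> simp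
          rw [pvDedup_congr _ _ _ hcomm, ih]

lemma pvIns_all (x : List (String × Int)) (l : List (List (String × Int)))
    (h : ∀ y ∈ l, pvBef x y = true) : pvIns x l = x :: l := by
  cases l with
  | nil => rfl
  | cons y ys => simp [pvIns, PySem.List.insertBy, h y (by simp)]

lemma pvIns_pairwise (x : List (String × Int)) (l : List (List (String × Int)))
    (h : l.Pairwise (fun a b => pvScore b ≤ pvScore a)) :
    (pvIns x l).Pairwise (fun a b => pvScore b ≤ pvScore a) := by
  induction l with
  | nil => simp [pvIns, PySem.List.insertBy]
  | cons y ys ih =>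
      rcases List.pairwise_cons.mp h with ⟨hy, hys⟩
      by_cases hb : pvBef x y = true
      · have hxy : pvScore y < pvScore x := by simpa [pvBef] using hb
        have hins : pvIns x (y :: ys) = x :: y :: ys := by
          simp [pvIns, PySem.List.insertBy, hb]
        rw [hins]
        refine List.pairwise_cons.mpr ⟨?_, h⟩
        intro z hz
        rcases List.mem_cons.mp hz with rfl | hz
        · exact le_of_lt hxy
        · exact le_trans (hy z hz) (le_of_lt hxy)
      · have hxy : pvScore x ≤ pvScore y := by simpa [pvBef] using hb
        simp only [pvIns, PySem.List.insertBy, hb, Bool.false_eq_true, if_neg, not_false_iff]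
        refine List.pairwise_cons.mpr ⟨?_, ih hys⟩
        intro z hz
        rcases (PySem.List.mem_insertBy pvBef x z ys).mp hz with rfl | hz
        · exact hxy
        · exact hy z hz

lemma pvFilter_ins (p : List (String × Int) → Bool) (x : List (String × Int))
    (l : List (List (String × Int))) (h : l.Pairwise (fun a b => pvScore b ≤ pvScore a)) :
    (pvIns x l).filter p = if p x then pvIns x (l.filter p) else l.filter p := by
  induction l with
  | nil => by_cases hx : p x <;> simp [pvIns, PySem.List.insertBy, List.filter, hx]
  | cons y ys ih =>
      rcases List.pairwise_cons.mp h with ⟨hy, hys⟩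
      by_cases hb : pvBef x y = true
      · have hall : ∀ z ∈ ys.filter p, pvBef x z = true := by
          intro z hz
          have hzm := List.mem_of_mem_filter hz
          have : pvScore z ≤ pvScore y := hy z hzm
          have hxy : pvScore y < pvScore x := by simpa [pvBef] using hb
          simp [pvBef]; omega
        by_cases hx : p x
        · by_cases hpy : p y
          · simp [pvIns, PySem.List.insertBy, hb, List.filter_cons, hx, hpy]
          · simp only [pvIns, PySem.List.insertBy, hb, if_pos, List.filter_cons, hx, hpy,
              Bool.false_eq_true, if_neg, not_false_iff, if_true]
            exact (pvIns_all x _ hall).symm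
        · by_cases hpy : p y <;>
            simp [pvIns, PySem.List.insertBy, hb, List.filter_cons, hx, hpy]
      · have hins : pvIns x (y :: ys) = y :: pvIns x ys := by
          simp [pvIns, PySem.List.insertBy, hb]
        rw [hins]
        by_cases hx : p x
        · rw [if_pos hx]
          by_cases hpy : p y
          · rw [List.filter_cons_of_pos hpy, List.filter_cons_of_pos hpy]
            have hins2 : pvIns x (y :: List.filter p ys) = y :: pvIns x (List.filter p ys) := by
              simp [pvIns, PySem.List.insertBy, hb]
            rw [hins2, ih hys, if_pos hx]
          · rw [List.filter_cons_of_neg hpy, List.filter_cons_of_neg hpy, ih hys, if_pos hx]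
        · rw [if_neg hx]
          by_cases hpy : p y
          · rw [List.filter_cons_of_pos hpy, List.filter_cons_of_pos hpy, ih hys, if_neg hx]
          · rw [List.filter_cons_of_neg hpy, List.filter_cons_of_neg hpy, ih hys, if_neg hx]

lemma pvFilter_fold (p : List (String × Int) → Bool) (xs : List (List (String × Int)))
    (acc : List (List (String × Int))) (h : acc.Pairwise (fun a b => pvScore b ≤ pvScore a)) :
    (xs.foldl (fun acc x => pvIns x acc) acc).filter p
      = (xs.filter p).foldl (fun acc x => pvIns x acc) (acc.filter p) := by
  induction xs generalizing acc with
  | nil => rfl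
  | cons x rest ih =>
      simp only [List.foldl_cons, List.filter_cons]
      rw [ih _ (pvIns_pairwise x acc h), pvFilter_ins p x acc h]
      by_cases hx : p x <;> simp [hx]

lemma pvFilter_Ssort (p : List (String × Int) → Bool) (xs : List (List (String × Int))) :
    (pvSsort xs).filter p = pvSsort (xs.filter p) := by
  simpa using pvFilter_fold p xs [] (by simp)

lemma pvHead_Ssort (xs : List (List (String × Int))) :
    ∀ m, PySem.List.max? xs (fun r => pvScore r) = some m → ∃ t, pvSsort xs = m :: t := by
  induction xs using List.reverseRecOn with
  | nil => intro m hm; simp [PySem.List.max?] at hm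
  | append_singleton xs x ih =>
      intro m hm
      have hS : pvSsort (xs ++ [x]) = pvIns x (pvSsort xs) := by
        simp [pvSsort, List.foldl_append, pvIns]
      rw [PySem.List.max?, List.foldl_append, List.foldl_cons, List.foldl_nil] at hm
      cases hxs : PySem.List.max? xs (fun r => pvScore r) with
      | none =>
          have hnil : xs = [] := (PySem.List.max?_eq_none_iff _ _).mp hxs
          rw [PySem.List.max?] at hxs
          rw [hxs] at hm
          subst hnil
          have hxm : x = m := by simpa using hm
          subst hxm
          exact ⟨[], by simp [pvSsort, pvIns, PySem.List.insertBy]⟩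
      | some m0 =>
          obtain ⟨t0, ht0⟩ := ih m0 hxs
          rw [PySem.List.max?] at hxs
          rw [hxs] at hm
          by_cases hlt : pvScore m0 < pvScore x
          · have hxm : x = m := by simpa [hlt] using hm
            subst hxm
            refine ⟨m0 :: t0, ?_⟩
            rw [hS, ht0]
            simp [pvIns, PySem.List.insertBy, pvBef, hlt]
          · have hxm : m0 = m := by simpa [hlt] using hm
            subst hxm
            refine ⟨pvIns x t0, ?_⟩
            rw [hS, ht0]
            simp [pvIns, PySem.List.insertBy, pvBef, hlt]

lemma pvAltLoop_none (acc rem : List (List (String × Int)))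
    (h : PySem.List.max? rem (fun r => pvScore r) = none) : pvAltLoop acc rem = acc := by
  rw [pvAltLoop, h]

lemma pvAltLoop_some (acc rem : List (List (String × Int))) (best : List (String × Int))
    (h : PySem.List.max? rem (fun r => pvScore r) = some best) :
    pvAltLoop acc rem = pvAltLoop (acc ++ [best]) (rem.filter (fun r => pvPid r != pvPid best)) := by
  rw [pvAltLoop, h]

lemma pvMain : ∀ (n : Nat) (xs : List (List (String × Int))), xs.length ≤ n →
    ∀ acc, acc ++ pvDedup PySem.Set.empty (pvSsort xs) = pvAltLoop acc xs := by
  intro n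
  induction n with
  | zero =>
      intro xs hlen acc
      have : xs = [] := List.eq_nil_of_length_eq_zero (Nat.le_zero.mp hlen)
      subst this
      rw [pvAltLoop_none _ _ (by simp [PySem.List.max?])]
      simp [pvSsort, pvDedup]
  | succ n ih =>
      intro xs hlen acc
      cases hmx : PySem.List.max? xs (fun r => pvScore r) with
      | none =>
          have : xs = [] := (PySem.List.max?_eq_none_iff _ _).mp hmx
          subst this
          rw [pvAltLoop_none _ _ hmx]
          simp [pvSsort, pvDedup]
      | some m =>
          obtain ⟨t, ht⟩ := pvHead_Ssort xs m hmx
          set p : List (String × Int) → Bool := fun r => pvPid r != pvPid m with hp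
          have hpm : p m = false := by simp [hp]
          have hfil : (pvSsort xs).filter p = t.filter p := by
            rw [ht, List.filter_cons, hpm]; simp
          have hchain : pvDedup PySem.Set.empty (pvSsort xs)
              = m :: pvDedup PySem.Set.empty (pvSsort (xs.filter p)) := by
            rw [ht]
            have hc : (PySem.Set.empty : PySem.Set Int).contains (pvPid m) = false := rfl
            simp only [pvDedup, hc, Bool.false_eq_true, if_neg, not_false_iff]
            refine congrArg (m :: ·) ?_
            have hadd : (PySem.Set.empty : PySem.Set Int).add (pvPid m)
                = PySem.Set.add PySem.Set.empty (pvPid m) := rfl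
            rw [pvDedup_add t PySem.Set.empty (pvPid m)]
            have : t.filter (fun r => pvPid r != pvPid m) = (pvSsort xs).filter p := by
              rw [hfil]
            rw [this, pvFilter_Ssort]
          have hmem : m ∈ xs := PySem.List.max?_mem hmx
          have hlt : (xs.filter p).length < xs.length :=
            List.length_filter_lt_length_iff_exists.mpr ⟨m, hmem, by simp [hp]⟩
          have hlen' : (xs.filter p).length ≤ n := by omega
          rw [hchain, pvAltLoop_some acc xs m hmx]
          have := ih (xs.filter p) hlen' (acc ++ [m])
          rw [← hp, ← this]
          simp

-- ===== VERDICT (by name: the statement is the Claim_ definition above) =====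
theorem filter_score_results_spec : Claim_equal_filter_score_results := by
  intro xs _ _
  unfold Spec_filter_score_results filter_score_results filter_score_results_alt
  rw [pvSsort_eq]
  rw [pvFoldA (pvSsort xs) [] PySem.Set.empty]
  simpa using pvMain xs.length xs (le_refl _) []
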